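-- pv_equiv track=rewrite | github.com/jtchico28/zoo | zoo.py | calculoPrecioYTipoBillete
-- ===== SOURCE A (Python) =====
-- catalogo_entradas = {
--     "GRATUITA": {"precio": 0, "e_umbral": 3},
--     "NINYOS": {"precio": 14, "e_umbral": 13},
--     "ADULTOS": {"precio": 23, "e_umbral": 65},
--     "JUBILADOS": {"precio": 18, "e_umbral": float('inf')}
-- }
--
-- def calculoPrecioYTipoBillete(edad: int):
--     # TODO: Poner esta funcion de forma que los indices encajen con el
--     precio = 0
--     tipo = 0
--
--     for tipo in catalogo_entradas:
--         if edad < catalogo_entradas[tipo]["e_umbral"]: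
--             precio = catalogo_entradas[tipo]["precio"]
--             break
--
--     return precio, tipo
-- ===== SOURCE B (Python) =====
-- _PRECIOS = (0, 14, 23, 18)
-- _TIPOS = ("GRATUITA", "NINYOS", "ADULTOS", "JUBILADOS")
--
-- def calculoPrecioYTipoBillete(edad: int):
--     # branch-free: count how many thresholds the age has passed, then index the tables
--     idx = (edad >= 3) + (edad >= 13) + (edad >= 65)
--     return _PRECIOS[idx], _TIPOS[idx]
-- ===== Notes on version B (the rewrite author's own statement) =====
-- stated objective: alternative
-- what changed: Replaced A's ordered scan of the catalog dict with a break (sequential compare-and-stop) by a branch-free rank computation: count how many thresholds the age has passed (sum of booleans) and index two constant tuples of prices and labels with that rank.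
import Mathlib
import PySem

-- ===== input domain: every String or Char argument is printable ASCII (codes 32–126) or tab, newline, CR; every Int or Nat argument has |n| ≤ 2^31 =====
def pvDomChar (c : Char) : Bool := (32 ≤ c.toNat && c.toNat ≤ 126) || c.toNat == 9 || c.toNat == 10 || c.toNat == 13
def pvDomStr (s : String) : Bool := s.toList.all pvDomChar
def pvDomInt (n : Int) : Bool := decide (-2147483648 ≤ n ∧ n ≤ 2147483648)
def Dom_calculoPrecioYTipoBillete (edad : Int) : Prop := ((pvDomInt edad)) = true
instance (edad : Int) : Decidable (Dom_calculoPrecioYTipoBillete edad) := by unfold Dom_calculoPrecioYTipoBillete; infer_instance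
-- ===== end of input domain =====

-- B replaces A's sequential catalog scan by a branch-free threshold-count (rank) plus table indexing (return value only).

-- ===== PORT A =====
-- the module-level catalog: (tipo, (precio, e_umbral)); e_umbral = none models float('inf')
-- (exact here: 'edad < inf' is always true for any int edad)
def pvCatalogo : List (String × Int × Option Int) :=
  [("GRATUITA", 0, some 3), ("NINYOS", 14, some 13),
   ("ADULTOS", 23, some 65), ("JUBILADOS", 18, none)]

-- the for-loop with break: walks the catalog, carrying (precio, tipo) state
def pvLoopA (edad : Int) : List (String × Int × Option Int) → Int × String → Int × String
  | [], st => st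
  | (tipo, precio, umbral) :: rest, st =>
      if (match umbral with | none => true | some u => decide (edad < u)) then
        (precio, tipo)   -- assign precio and break (tipo is the loop variable)
      else
        pvLoopA edad rest (st.1, tipo)

def calculoPrecioYTipoBillete (edad : Int) : Int × String :=
  -- precio = 0; tipo = 0 (tipo is immediately overwritten by the loop; the loop
  -- always breaks since the last threshold is inf, so the initial tipo is never returned)
  pvLoopA edad pvCatalogo (0, "0")

-- ===== PORT B =====
def pvPrecios : List Int := [0, 14, 23, 18]
def pvTipos : List String := ["GRATUITA", "NINYOS", "ADULTOS", "JUBILADOS"]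

def calculoPrecioYTipoBillete_alt (edad : Int) : Int × String :=
  -- idx = (edad >= 3) + (edad >= 13) + (edad >= 65); idx is always in [0,3]
  let idx : Nat := (if 3 ≤ edad then 1 else 0) + (if 13 ≤ edad then 1 else 0)
                 + (if 65 ≤ edad then 1 else 0)
  (pvPrecios.getD idx 0, pvTipos.getD idx "")

-- ===== PRECONDITION & SPEC =====
def Spec_calculoPrecioYTipoBillete (edad : Int) (out : Int × String) : Prop := out = calculoPrecioYTipoBillete_alt edad
instance (edad : Int) (out : Int × String) : Decidable (Spec_calculoPrecioYTipoBillete edad out) := by unfold Spec_calculoPrecioYTipoBillete; infer_instance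

-- ===== CLAIM (what is proved, stated in full; the proofs are below) =====
def Claim_equal_calculoPrecioYTipoBillete : Prop := ∀ (edad : Int), Dom_calculoPrecioYTipoBillete edad → Spec_calculoPrecioYTipoBillete edad (calculoPrecioYTipoBillete edad)

-- ===== LEMMAS AND PROOFS =====

-- ===== VERDICT (by name: the statement is the Claim_ definition above) =====
theorem calculoPrecioYTipoBillete_spec : Claim_equal_calculoPrecioYTipoBillete := by
  intro edad _
  unfold Spec_calculoPrecioYTipoBillete calculoPrecioYTipoBillete calculoPrecioYTipoBillete_alt pvCatalogo pvPrecios pvTipos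
  by_cases h3 : edad < 3
  · simp [pvLoopA, h3, show ¬ (3 ≤ edad) by omega, show ¬ (13 ≤ edad) by omega, show ¬ (65 ≤ edad) by omega]
  · by_cases h13 : edad < 13
    · simp [pvLoopA, h3, h13, show 3 ≤ edad by omega, show ¬ (13 ≤ edad) by omega, show ¬ (65 ≤ edad) by omega]
    · by_cases h65 : edad < 65
      · simp [pvLoopA, h3, h13, h65, show 3 ≤ edad by omega, show 13 ≤ edad by omega, show ¬ (65 ≤ edad) by omega]
      · simp [pvLoopA, h3, h13, h65, show 3 ≤ edad by omega, show 13 ≤ edad by omega, show 65 ≤ edad by omega]
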